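-- pv_equiv track=rewrite | github.com/bits-gaurav/Automated-DevOps-Pipeline-Monitor | api/routers/pipeline.py | get_pipeline_status
-- ===== SOURCE A (Python) =====
-- from typing import List, Optional, Dict, Any
--
-- def get_pipeline_status(runs: List[Dict]) -> str:
--     """Determine overall pipeline status"""
--     if not runs:
--         return "idle"
--
--     # Check for any running workflows
--     running_runs = [r for r in runs if r.get("status") in ["in_progress", "queued"]]
--     if running_runs:
--         return "running"
--
--     # Check most recent completed run
--     completed_runs = [r for r in runs if r.get("status") == "completed"]
--     if completed_runs:
--         # Sort by updated_at to get most recent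
--         completed_runs.sort(key=lambda x: x.get("updated_at", ""), reverse=True)
--         latest_run = completed_runs[0]
--
--         conclusion = latest_run.get("conclusion")
--         if conclusion == "success":
--             return "success"
--         elif conclusion in ["failure", "timed_out"]:
--             return "failed"
--         elif conclusion == "cancelled":
--             return "cancelled"
--
--     return "idle"
-- ===== SOURCE B (Python) =====
-- def _classify(conclusion):
--     if conclusion == "success":
--         return "success"
--     if conclusion in ("failure", "timed_out"):
--         return "failed"
--     if conclusion == "cancelled":
--         return "cancelled"
--     return "idle"
--
--
-- def get_pipeline_status(runs):
--     """Single pass: track a running flag and the most-recent completed run."""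
--     if not runs:
--         return "idle"
--     running = False
--     best = None
--     for r in runs:
--         status = r.get("status")
--         if status in ("in_progress", "queued"):
--             running = True
--         elif status == "completed":
--             if best is None or best.get("updated_at", "") < r.get("updated_at", ""):
--                 best = r
--     if running:
--         return "running"
--     if best is None:
--         return "idle"
--     return _classify(best.get("conclusion"))
-- ===== Notes on version B (the rewrite author's own statement) =====
-- stated objective: alternative
-- what changed: Replaced A's two filter passes plus sort-descending-and-take-head with a single left-to-right pass that maintains a running flag and the first most-recent completed run (a running maximum), dispatching the conclusion afterwards.
import Mathlib
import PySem

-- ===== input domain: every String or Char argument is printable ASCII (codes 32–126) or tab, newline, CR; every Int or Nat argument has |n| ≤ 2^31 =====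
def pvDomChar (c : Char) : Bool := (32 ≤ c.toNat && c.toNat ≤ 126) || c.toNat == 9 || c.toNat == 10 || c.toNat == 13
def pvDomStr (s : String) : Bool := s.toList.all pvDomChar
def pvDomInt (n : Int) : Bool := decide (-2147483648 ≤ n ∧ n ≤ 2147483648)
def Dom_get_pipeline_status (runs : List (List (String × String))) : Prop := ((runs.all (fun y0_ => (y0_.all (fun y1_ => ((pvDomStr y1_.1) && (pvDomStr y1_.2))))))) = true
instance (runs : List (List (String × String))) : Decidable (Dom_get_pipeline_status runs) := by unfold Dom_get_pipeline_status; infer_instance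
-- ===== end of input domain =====

-- B is a single pass (running flag + running maximum) instead of A's filter/sort/head; return values proved equal on all inputs.

-- shared helper: Python's dict.get — first match in the association list
def pvDictGet (r : List (String × String)) (k : String) : Option String :=
  (r.find? (fun p => p.1 == k)).map (·.2)

-- ===== PORT A =====
def get_pipeline_status (runs : List (List (String × String))) : String :=
  if runs = [] then "idle"
  else
    let running_runs := runs.filter (fun r =>
      pvDictGet r "status" == some "in_progress" || pvDictGet r "status" == some "queued")
    if running_runs ≠ [] then "running"
    else
      let completed_runs := runs.filter (fun r => pvDictGet r "status" == some "completed")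
      if completed_runs ≠ [] then
        -- completed_runs.sort(key=..., reverse=True); latest_run = completed_runs[0]
        match PySem.List.sorted completed_runs (fun x => (pvDictGet x "updated_at").getD "") true with
        | [] => "idle"  -- unreachable: sorted of a nonempty list is nonempty
        | latest_run :: _ =>
          let conclusion := pvDictGet latest_run "conclusion"
          if conclusion == some "success" then "success"
          else if conclusion == some "failure" || conclusion == some "timed_out" then "failed"
          else if conclusion == some "cancelled" then "cancelled"
          else "idle"
      else "idle"

-- ===== PORT B =====
def pvClassify (conclusion : Option String) : String :=
  if conclusion == some "success" then "success"
  else if conclusion == some "failure" || conclusion == some "timed_out" then "failed"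
  else if conclusion == some "cancelled" then "cancelled"
  else "idle"

-- one loop-body step of B's scan: (running flag, best completed run so far)
def pvScanStep (st : Bool × Option (List (String × String))) (r : List (String × String)) :
    Bool × Option (List (String × String)) :=
  let status := pvDictGet r "status"
  if status == some "in_progress" || status == some "queued" then (true, st.2)
  else if status == some "completed" then
    match st.2 with
    | none => (st.1, some r)
    | some b =>
      if (pvDictGet b "updated_at").getD "" < (pvDictGet r "updated_at").getD ""
      then (st.1, some r) else (st.1, some b)
  else st

def get_pipeline_status_alt (runs : List (List (String × String))) : String :=
  if runs = [] then "idle"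
  else
    let st := runs.foldl pvScanStep (false, none)
    if st.1 then "running"
    else
      match st.2 with
      | none => "idle"
      | some best => pvClassify (pvDictGet best "conclusion")

-- ===== PRECONDITION & SPEC =====
def Spec_get_pipeline_status (runs : List (List (String × String))) (out : String) : Prop := out = get_pipeline_status_alt runs
instance (runs : List (List (String × String))) (out : String) : Decidable (Spec_get_pipeline_status runs out) := by unfold Spec_get_pipeline_status; infer_instance

-- ===== CLAIM (what is proved, stated in full; the proofs are below) =====
def Claim_equal_get_pipeline_status : Prop := ∀ (runs : List (List (String × String))), Dom_get_pipeline_status runs → Spec_get_pipeline_status runs (get_pipeline_status runs)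

-- ===== LEMMAS AND PROOFS =====

-- abbreviations used only by the proofs
def pvKey (x : List (String × String)) : String := (pvDictGet x "updated_at").getD ""
def pvIsRun (r : List (String × String)) : Bool :=
  pvDictGet r "status" == some "in_progress" || pvDictGet r "status" == some "queued"
def pvIsComp (r : List (String × String)) : Bool := pvDictGet r "status" == some "completed"
def pvMaxStep (acc : Option (List (String × String))) (x : List (String × String)) :
    Option (List (String × String)) :=
  match acc with
  | none => some x
  | some m => if pvKey m < pvKey x then some x else some m

theorem pvStep_eq (b : Bool) (o : Option (List (String × String))) (r : List (String × String)) :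
    pvScanStep (b, o) r = (b || pvIsRun r, if pvIsComp r then pvMaxStep o r else o) := by
  unfold pvScanStep pvIsRun pvIsComp pvMaxStep
  by_cases h1 : (pvDictGet r "status" == some "in_progress" || pvDictGet r "status" == some "queued") = true
  · have hc : (pvDictGet r "status" == some "completed") = false := by
      rcases Bool.or_eq_true_iff.mp h1 with h | h <;>
        simp only [beq_iff_eq] at h <;> simp [h]
    simp [h1, hc]
  · simp only [Bool.not_eq_true] at h1
    by_cases h2 : (pvDictGet r "status" == some "completed") = true
    · simp only [h1, h2, Bool.or_false, if_true, Bool.false_eq_true, if_false]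
      cases o with
      | none => rfl
      | some m =>
        dsimp only
        simp only [pvKey]
        split <;> rfl
    · simp only [Bool.not_eq_true] at h2
      simp [h1, h2]

theorem pvScan_fst (runs : List (List (String × String))) (b : Bool)
    (o : Option (List (String × String))) :
    (runs.foldl pvScanStep (b, o)).1 = (b || runs.any pvIsRun) := by
  induction runs generalizing b o with
  | nil => simp
  | cons r t ih =>
    simp only [List.foldl_cons, List.any_cons]
    rw [pvStep_eq, ih, Bool.or_assoc]

theorem pvScan_snd (runs : List (List (String × String))) (b : Bool)
    (o : Option (List (String × String))) :
    (runs.foldl pvScanStep (b, o)).2 = (runs.filter pvIsComp).foldl pvMaxStep o := by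
  induction runs generalizing b o with
  | nil => simp
  | cons r t ih =>
    simp only [List.foldl_cons, List.filter_cons]
    rw [pvStep_eq, ih]
    by_cases hc : pvIsComp r = true
    · simp [hc]
    · simp only [Bool.not_eq_true] at hc
      simp [hc]

theorem pvMax_fold (l : List (List (String × String)))
    (acc : Option (List (String × String))) :
    l.foldl pvMaxStep acc = l.foldl
      (fun acc x =>
        match acc with
        | none => some x
        | some m => if pvKey m < pvKey x then some x else some m) acc := by
  induction l generalizing acc with
  | nil => rfl
  | cons x t ih =>
    simp only [List.foldl_cons]
    rw [ih]
    congr 1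

theorem pvMax_eq (l : List (List (String × String))) :
    l.foldl pvMaxStep none = PySem.List.max? l pvKey := by
  rw [pvMax_fold]
  unfold PySem.List.max?
  congr 1
  funext acc x
  cases acc with
  | none => rfl
  | some m => by_cases h : pvKey m < pvKey x <;> simp [h]

theorem pvScan_max (runs : List (List (String × String))) :
    (runs.foldl pvScanStep (false, none)).2 =
      PySem.List.max? (runs.filter pvIsComp) pvKey := by
  rw [pvScan_snd, pvMax_eq]

theorem pvHead_insertBy (x : List (String × String)) (acc : List (List (String × String))) :
    (PySem.List.insertBy (fun a b => decide (pvKey b < pvKey a)) x acc).head? =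
      pvMaxStep acc.head? x := by
  cases acc with
  | nil => rfl
  | cons y ys =>
    unfold PySem.List.insertBy pvMaxStep
    simp only [List.head?_cons]
    by_cases h : pvKey y < pvKey x
    · simp [h]
    · simp [h]

theorem pvHead_foldl_insertBy (l : List (List (String × String)))
    (acc : List (List (String × String))) :
    (l.foldl (fun acc x => PySem.List.insertBy (fun a b => decide (pvKey b < pvKey a)) x acc) acc).head?
      = l.foldl pvMaxStep acc.head? := by
  induction l generalizing acc with
  | nil => rfl
  | cons x t ih =>
    simp only [List.foldl_cons]
    rw [ih, pvHead_insertBy]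

theorem pvSorted_head_eq_max (l : List (List (String × String))) :
    (PySem.List.sorted l pvKey true).head? = PySem.List.max? l pvKey := by
  rw [PySem.List.sorted_rev_eq_foldl_insertBy, pvHead_foldl_insertBy l []]
  exact pvMax_eq l

-- ===== VERDICT (by name: the statement is the Claim_ definition above) =====
theorem get_pipeline_status_spec : Claim_equal_get_pipeline_status := by
  intro runs _dom
  unfold Spec_get_pipeline_status get_pipeline_status get_pipeline_status_alt
  by_cases hnil : runs = []
  · simp [hnil]
  · rw [if_neg hnil, if_neg hnil]
    simp only [pvScan_fst, pvScan_max, Bool.false_or]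
    by_cases hany : runs.any pvIsRun = true
    · have hfil : runs.filter (fun r =>
          pvDictGet r "status" == some "in_progress" || pvDictGet r "status" == some "queued") ≠ [] := by
        simp only [List.any_eq_true] at hany
        obtain ⟨r, hr, hrun⟩ := hany
        intro hcon
        have := List.filter_eq_nil_iff.mp hcon r hr
        unfold pvIsRun at hrun
        exact absurd hrun (by simpa using this)
      rw [if_pos hfil, hany]
      rfl
    · simp only [Bool.not_eq_true] at hany
      have hfil : ¬ (runs.filter (fun r =>
          pvDictGet r "status" == some "in_progress" || pvDictGet r "status" == some "queued") ≠ []) := by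
        simp only [not_not, List.filter_eq_nil_iff]
        intro r hr
        have := List.any_eq_false.mp hany r hr
        unfold pvIsRun at this
        simpa using this
      rw [if_neg hfil, hany]
      simp only [if_false, Bool.false_eq_true]
      have hcompfil : runs.filter (fun r => pvDictGet r "status" == some "completed")
          = runs.filter pvIsComp := rfl
      rw [hcompfil]
      cases hmax : PySem.List.max? (runs.filter pvIsComp) pvKey with
      | none =>
        have hempty : runs.filter pvIsComp = [] := (PySem.List.max?_eq_none_iff _ _).mp hmax
        rw [if_neg (by simpa using hempty)]
      | some m =>
        have hne : runs.filter pvIsComp ≠ [] := by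
          intro hcon
          rw [hcon] at hmax
          simp [PySem.List.max?] at hmax
        rw [if_pos hne]
        have hhead : (PySem.List.sorted (runs.filter pvIsComp) pvKey true).head? = some m := by
          rw [pvSorted_head_eq_max, hmax]
        have hkeyeq : (PySem.List.sorted (runs.filter pvIsComp)
            (fun x => (pvDictGet x "updated_at").getD "") true)
            = PySem.List.sorted (runs.filter pvIsComp) pvKey true := rfl
        rw [hkeyeq]
        cases hs : PySem.List.sorted (runs.filter pvIsComp) pvKey true with
        | nil => rw [hs] at hhead; simp at hhead
        | cons latest rest =>
          rw [hs] at hhead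
          simp only [List.head?_cons, Option.some.injEq] at hhead
          rw [hhead]
          rfl
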